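-- pv_equiv track=rewrite | github.com/AriathGonzalez/RDT | server.py | create_checksum
-- ===== SOURCE A (Python) =====
-- def create_checksum(i, data):
--     """
--     Creates a checksum for the given data.
--
--     Parameters:
--         i (int): Sequence number.
--         data (bytes): Data for which checksum is to be created.
--
--     Returns:
--         str: Computed checksum.
--     """
--     data_sum = len(data)
--     bit_sum = bin(data_sum)[2:]
--
--     # Pad to 10 bits
--     while len(bit_sum) < 10:
--         bit_sum = '0' + bit_sum
--
--     checksum = ''
--     for bit in bit_sum:
--         checksum += '1' if bit == '0' else '0'
--
--     return checksum
-- ===== SOURCE B (Python) =====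
-- def create_checksum(i, data):
--     n = len(data)
--     width = max(n.bit_length(), 10)
--     return format((1 << width) - 1 - n, '0{}b'.format(width))
-- ===== Notes on version B (the rewrite author's own statement) =====
-- stated objective: simpler
-- what changed: Replaces the while-loop zero-padding and the character-by-character bit-inversion loop with a single arithmetic one's-complement (2^width - 1 - n) rendered by one zero-padded format call, width = max(n.bit_length(), 10).
import Mathlib
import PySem

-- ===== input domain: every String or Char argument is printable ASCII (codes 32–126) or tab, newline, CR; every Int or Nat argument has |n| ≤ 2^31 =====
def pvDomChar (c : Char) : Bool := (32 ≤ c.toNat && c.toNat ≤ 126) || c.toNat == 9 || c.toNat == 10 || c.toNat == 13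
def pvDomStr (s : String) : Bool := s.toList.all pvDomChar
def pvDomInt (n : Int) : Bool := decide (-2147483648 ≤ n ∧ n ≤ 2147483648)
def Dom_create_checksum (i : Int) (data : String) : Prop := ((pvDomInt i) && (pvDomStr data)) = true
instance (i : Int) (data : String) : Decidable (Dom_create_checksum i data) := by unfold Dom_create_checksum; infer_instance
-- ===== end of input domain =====

-- B replaces A's padding loop and per-character inversion loop by one arithmetic
-- one's-complement plus a zero-padded binary format (objective: simpler).

-- ===== PORT A =====
-- Python's bin(n)[2:] for n ≥ 0, hand-ported (exact): binary digits, LSB first …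
def pvBinLsb : Nat → List Char
  | 0 => []
  | (n+1) => (if (n+1) % 2 = 1 then '1' else '0') :: pvBinLsb ((n+1) / 2)
decreasing_by exact Nat.div_lt_self (Nat.succ_pos n) (by omega)

-- … reversed gives bin(n)[2:]; bin(0)[2:] = "0"
def pvPyBin (n : Nat) : List Char := if n = 0 then ['0'] else (pvBinLsb n).reverse

-- A's `while len(bit_sum) < 10: bit_sum = '0' + bit_sum`
def pvPad (l : List Char) : List Char :=
  if l.length < 10 then pvPad ('0' :: l) else l
termination_by 10 - l.length
decreasing_by simp_all; omega

def create_checksum (i : Int) (data : String) : String :=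
  let data_sum := data.toList.length           -- len(data), exact (≥ 0)
  let bit_sum := pvPad (pvPyBin data_sum)
  -- for bit in bit_sum: checksum += '1' if bit == '0' else '0'
  let checksum := bit_sum.foldl (fun acc c => acc ++ [if c = '0' then '1' else '0']) ([] : List Char)
  String.mk checksum

-- ===== PORT B =====
-- Python's n.bit_length(), hand-ported (exact)
def pvBitLength : Nat → Nat
  | 0 => 0
  | (n+1) => pvBitLength ((n+1) / 2) + 1
decreasing_by exact Nat.div_lt_self (Nat.succ_pos n) (by omega)

def create_checksum_alt (i : Int) (data : String) : String :=
  let n := data.toList.length                  -- len(data), exact (≥ 0)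
  let width := max (pvBitLength n) 10
  let m := 2 ^ width - 1 - n                   -- (1 << width) - 1 - n, m ≥ 0 since n < 2^width
  -- format(m, '0{}b'.format(width)): binary digits of m left-padded with '0' to width
  String.mk (List.replicate (width - (pvPyBin m).length) '0' ++ pvPyBin m)

-- ===== PRECONDITION & SPEC =====
def Spec_create_checksum (i : Int) (data : String) (out : String) : Prop := out = create_checksum_alt i data
instance (i : Int) (data : String) (out : String) : Decidable (Spec_create_checksum i data out) := by unfold Spec_create_checksum; infer_instance

-- ===== CLAIM (what is proved, stated in full; the proofs are below) =====
def Claim_equal_create_checksum : Prop := ∀ (i : Int) (data : String), Dom_create_checksum i data → Spec_create_checksum i data (create_checksum i data)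

-- ===== LEMMAS AND PROOFS =====

-- the bit inversion A performs character by character
def pvInv (c : Char) : Char := if c = '0' then '1' else '0'

-- exactly w binary digits of n, LSB first (proof-only device)
def pvLsbW : Nat → Nat → List Char
  | 0, _ => []
  | (w+1), n => (if n % 2 = 1 then '1' else '0') :: pvLsbW w (n / 2)

theorem pvFoldl_inv (l : List Char) (s : List Char) :
    l.foldl (fun acc c => acc ++ [if c = '0' then '1' else '0']) s = s ++ l.map pvInv := by
  induction l generalizing s with
  | nil => simp
  | cons c t ih => simp [List.foldl, ih, pvInv]

theorem pvPad_eq (l : List Char) :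
    pvPad l = List.replicate (10 - l.length) '0' ++ l := by
  fun_induction pvPad l with
  | case1 l h ih =>
    rw [ih]
    have : 10 - l.length = (10 - ('0' :: l).length) + 1 := by simp; omega
    rw [this, List.replicate_succ']
    simp
  | case2 l h => simp; omega

theorem pvBinLsb_length (n : Nat) : (pvBinLsb n).length = pvBitLength n := by
  fun_induction pvBinLsb n with
  | case1 => simp [pvBitLength]
  | case2 n ih => simp [pvBitLength, ih]

theorem pvLt_two_pow_bitLength (n : Nat) : n < 2 ^ pvBitLength n := by
  fun_induction pvBitLength n with
  | case1 => simp
  | case2 n ih =>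
    rw [pow_succ]
    omega

theorem pvLsbW_eq_pad (w n : Nat) (h : n < 2 ^ w) :
    pvLsbW w n = pvBinLsb n ++ List.replicate (w - pvBitLength n) '0' := by
  induction w generalizing n with
  | zero =>
    interval_cases n
    simp [pvLsbW, pvBinLsb]
  | succ w ih =>
    match n with
    | 0 =>
      simp only [pvLsbW, pvBinLsb, pvBitLength]
      rw [ih 0 (by positivity)]
      simp [pvBinLsb, pvBitLength, List.replicate_succ]
    | (k+1) =>
      have hp : 2 ^ (w+1) = 2 * 2 ^ w := by ring
      have hd : (k+1) / 2 < 2 ^ w := by omega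
      simp only [pvLsbW, pvBinLsb, pvBitLength]
      rw [ih _ hd]
      simp

theorem pvLsbW_complement (w n : Nat) (h : n < 2 ^ w) :
    (pvLsbW w n).map pvInv = pvLsbW w (2 ^ w - 1 - n) := by
  induction w generalizing n with
  | zero => simp [pvLsbW]
  | succ w ih =>
    have hp : 2 ^ (w+1) = 2 * 2 ^ w := by ring
    have hd : n / 2 < 2 ^ w := by omega
    have hm2 : (2 ^ (w+1) - 1 - n) % 2 = 1 - n % 2 := by omega
    have hd2 : (2 ^ (w+1) - 1 - n) / 2 = 2 ^ w - 1 - n / 2 := by omega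
    simp only [pvLsbW, List.map_cons, ih _ hd, hm2, hd2]
    rcases Nat.mod_two_eq_zero_or_one n with h2 | h2 <;> simp [h2, pvInv]

-- left-padding pvPyBin n with '0' to width w is the w-bit MSB-first representation
theorem pvPadded_eq (w n : Nat) (hw : 1 ≤ w) (h : n < 2 ^ w) :
    List.replicate (w - (pvPyBin n).length) '0' ++ pvPyBin n = (pvLsbW w n).reverse := by
  match n with
  | 0 =>
    have : pvLsbW w 0 = pvBinLsb 0 ++ List.replicate w '0' := by
      simpa [pvBitLength] using pvLsbW_eq_pad w 0 (by positivity)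
    simp only [pvPyBin, this]
    simp [pvBinLsb]
    rw [show w = (w - 1) + 1 by omega, List.replicate_succ']
    simp
  | (k+1) =>
    have := pvLsbW_eq_pad w (k+1) h
    simp only [pvPyBin, Nat.succ_ne_zero]
    rw [this]
    simp [pvBinLsb_length]

theorem pvLen10 (n : Nat) :
    10 - (pvPyBin n).length = max (pvBitLength n) 10 - (pvPyBin n).length := by
  match n with
  | 0 => simp [pvPyBin, pvBitLength]
  | (k+1) =>
    have h : (pvPyBin (k+1)).length = pvBitLength (k+1) := by
      simp [pvPyBin, pvBinLsb_length]
    rw [h]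
    omega

theorem create_checksum_eq_alt (i : Int) (data : String) :
    create_checksum i data = create_checksum_alt i data := by
  unfold create_checksum create_checksum_alt
  simp only [pvFoldl_inv, List.nil_append, pvPad_eq, pvLen10]
  set n := data.toList.length with hn
  set w := max (pvBitLength n) 10 with hw
  have hw1 : 1 ≤ w := by omega
  have hnw : n < 2 ^ w :=
    lt_of_lt_of_le (pvLt_two_pow_bitLength n)
      (Nat.pow_le_pow_right (by norm_num) (le_max_left _ _))
  have hpw : 1 ≤ 2 ^ w := Nat.one_le_two_pow
  have hmw : 2 ^ w - 1 - n < 2 ^ w := by omega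
  rw [pvPadded_eq w n hw1 hnw, List.map_reverse, pvLsbW_complement w n hnw,
      ← pvPadded_eq w _ hw1 hmw]

-- ===== VERDICT (by name: the statement is the Claim_ definition above) =====
theorem create_checksum_spec : Claim_equal_create_checksum := by
  intro i data _
  exact create_checksum_eq_alt i data
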